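-- pv_equiv track=rewrite | github.com/BigFish003/Pory | pory/game.py | get_adjacent_indices
-- ===== SOURCE A (Python) =====
-- def get_adjacent_indices(index):
--     # Get indices of adjacent tiles (including diagonals)
--     row, col = divmod(index, 11)
--     adjacent = []
--     directions = [
--         (-1, -1), (-1, 0), (-1, 1),  # Upper row
--         (0, -1),          (0, 1),    # Same row
--         (1, -1),  (1, 0),  (1, 1)    # Lower row
--     ]
--     for dr, dc in directions:
--         r, c = row + dr, col + dc
--         if 0 <= r < 11 and 0 <= c < 11:
--             adjacent.append(r * 11 + c)
--     return adjacent
-- ===== SOURCE B (Python) =====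
-- def get_adjacent_indices(index):
--     # Scan the whole 11x11 grid and keep cells at Chebyshev distance exactly 1.
--     row, col = divmod(index, 11)
--     return [j for j in range(121)
--             if max(abs(j // 11 - row), abs(j % 11 - col)) == 1]
-- ===== Notes on version B (the rewrite author's own statement) =====
-- stated objective: alternative
-- what changed: Replaces A's enumeration of 8 candidate offsets with bounds checks by a single filter over all 121 grid cells keeping those at Chebyshev distance exactly 1 from the cell; row-major grid order coincides with A's direction order.
import Mathlib
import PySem

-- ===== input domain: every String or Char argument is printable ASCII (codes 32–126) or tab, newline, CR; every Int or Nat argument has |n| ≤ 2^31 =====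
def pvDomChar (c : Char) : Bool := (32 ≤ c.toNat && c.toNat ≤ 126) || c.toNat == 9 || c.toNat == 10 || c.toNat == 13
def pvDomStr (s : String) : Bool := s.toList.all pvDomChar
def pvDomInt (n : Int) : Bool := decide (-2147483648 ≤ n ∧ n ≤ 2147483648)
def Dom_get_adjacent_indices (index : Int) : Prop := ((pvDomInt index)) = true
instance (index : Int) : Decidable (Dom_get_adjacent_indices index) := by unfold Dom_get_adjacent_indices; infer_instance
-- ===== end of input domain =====

-- B scans all 121 grid cells once and keeps those at Chebyshev distance exactly 1,
-- instead of A's enumeration of 8 offsets with bounds checks (alternative decomposition).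

-- ===== PORT A =====
def pvDirs : List (Int × Int) :=
  [(-1, -1), (-1, 0), (-1, 1), (0, -1), (0, 1), (1, -1), (1, 0), (1, 1)]

def get_adjacent_indices (index : Int) : List Int :=
  let row := PySem.Int.floordiv index 11
  let col := PySem.Int.mod index 11
  pvDirs.foldl
    (fun adjacent dir =>
      if 0 ≤ row + dir.1 ∧ row + dir.1 < 11 ∧ 0 ≤ col + dir.2 ∧ col + dir.2 < 11 then
        adjacent ++ [(row + dir.1) * 11 + (col + dir.2)]
      else adjacent)
    []

-- ===== PORT B =====
def get_adjacent_indices_alt (index : Int) : List Int :=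
  let row := PySem.Int.floordiv index 11
  let col := PySem.Int.mod index 11
  (PySem.List.pyRange 0 121 1).filter
    (fun j => max |PySem.Int.floordiv j 11 - row| |PySem.Int.mod j 11 - col| == 1)

-- ===== PRECONDITION & SPEC =====
def Spec_get_adjacent_indices (index : Int) (out : List Int) : Prop := out = get_adjacent_indices_alt index
instance (index : Int) (out : List Int) : Decidable (Spec_get_adjacent_indices index out) := by unfold Spec_get_adjacent_indices; infer_instance

-- ===== CLAIM (what is proved, stated in full; the proofs are below) =====
def Claim_equal_get_adjacent_indices : Prop := ∀ (index : Int), Dom_get_adjacent_indices index → Spec_get_adjacent_indices index (get_adjacent_indices index)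

-- ===== LEMMAS AND PROOFS =====

-- A's loop adds nothing when every candidate cell is out of bounds.
lemma pv_foldl_nil (row col : Int) (ds : List (Int × Int))
    (h : ∀ d ∈ ds, ¬(0 ≤ row + d.1 ∧ row + d.1 < 11 ∧ 0 ≤ col + d.2 ∧ col + d.2 < 11))
    (acc : List Int) :
    ds.foldl
      (fun adjacent dir =>
        if 0 ≤ row + dir.1 ∧ row + dir.1 < 11 ∧ 0 ≤ col + dir.2 ∧ col + dir.2 < 11 then
          adjacent ++ [(row + dir.1) * 11 + (col + dir.2)]
        else adjacent)
      acc = acc := by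
  induction ds generalizing acc with
  | nil => rfl
  | cons d ds ih =>
    rw [List.foldl_cons, if_neg (h d (List.mem_cons_self))]
    exact ih (fun e he => h e (List.mem_cons_of_mem _ he)) _

-- B's filter keeps nothing when the center row is far outside the grid.
lemma pv_filter_nil (row col : Int) (hr : row ≤ -2 ∨ 13 ≤ row) :
    (PySem.List.pyRange 0 121 1).filter
      (fun j => max |PySem.Int.floordiv j 11 - row| |PySem.Int.mod j 11 - col| == 1) = [] := by
  apply List.filter_eq_nil_iff.mpr
  intro j hj
  have hmem : 0 ≤ j ∧ j < 121 := by
    have := (PySem.List.mem_pyRange_one (a := 0) (b := 121) (x := j)).mp hj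
    omega
  have h0 : (0:Int) < 11 := by norm_num
  have hfd : PySem.Int.floordiv j 11 = j / 11 := PySem.Int.floordiv_eq_ediv_of_pos h0
  have hlo : 0 ≤ j / 11 := Int.ediv_nonneg hmem.1 (by norm_num)
  have hhi : j / 11 < 11 := by omega
  simp only [beq_iff_eq, hfd]
  intro hmax
  have h1 : |j / 11 - row| ≤ 1 := by
    have := le_max_left |j / 11 - row| |PySem.Int.mod j 11 - col|
    omega
  rw [abs_le] at h1
  omega

-- The two computations agree for every row and every in-range column.
lemma pv_core (row col : Int) (h0 : 0 ≤ col) (h1 : col < 11) :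
    pvDirs.foldl
      (fun adjacent dir =>
        if 0 ≤ row + dir.1 ∧ row + dir.1 < 11 ∧ 0 ≤ col + dir.2 ∧ col + dir.2 < 11 then
          adjacent ++ [(row + dir.1) * 11 + (col + dir.2)]
        else adjacent)
      [] =
    (PySem.List.pyRange 0 121 1).filter
      (fun j => max |PySem.Int.floordiv j 11 - row| |PySem.Int.mod j 11 - col| == 1) := by
  rcases le_or_gt row (-2) with hr | hr
  · rw [pv_filter_nil row col (Or.inl hr)]
    exact pv_foldl_nil row col pvDirs (by intro d hd; fin_cases hd <;> simp <;> omega) []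
  · rcases le_or_gt 13 row with hr2 | hr2
    · rw [pv_filter_nil row col (Or.inr hr2)]
      exact pv_foldl_nil row col pvDirs (by intro d hd; fin_cases hd <;> simp <;> omega) []
    · have hrl : -1 ≤ row := by omega
      have hru : row ≤ 12 := by omega
      interval_cases row <;> interval_cases col <;> decide

-- ===== VERDICT (by name: the statement is the Claim_ definition above) =====
theorem get_adjacent_indices_spec : Claim_equal_get_adjacent_indices := by
  intro index _
  show get_adjacent_indices index = get_adjacent_indices_alt index
  simp only [get_adjacent_indices, get_adjacent_indices_alt]
  have h11 : (0:Int) < 11 := by norm_num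
  rw [PySem.Int.mod_eq_emod_of_pos h11]
  exact pv_core _ _ (Int.emod_nonneg _ (by norm_num)) (Int.emod_lt_of_pos _ h11)
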